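-- pv_equiv track=rewrite | github.com/Dub1n/SotE-Detailed-Item-Descriptions | scripts/build_aow/build_aow_stage3.py | build_slot_coverage
-- ===== SOURCE A (Python) =====
-- from typing import Dict, List, Tuple, NamedTuple
--
-- def build_slot_coverage(rows: List[Dict[str, str]]) -> Tuple[Tuple[int, int, int], ...]:
--     slots = set()
--     for row in rows:
--         try:
--             step = int(str(row.get("Step", "") or "1"))
--         except ValueError:
--             step = 1
--         fp_val = 0 if str(row.get("FP", "")).strip() == "0" else 1
--         charged_val = 1 if str(row.get("Charged", "")).strip() == "1" else 0
--         slots.add((fp_val, charged_val, step))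
--     return tuple(sorted(slots))
-- ===== SOURCE B (Python) =====
-- from typing import Dict, List, Tuple
--
-- def build_slot_coverage(rows: List[Dict[str, str]]) -> Tuple[Tuple[int, int, int], ...]:
--     # Bucket the step values by (fp, charged): since fp and charged are each 0 or 1,
--     # the lexicographically sorted output is exactly the four buckets emitted in the
--     # fixed order (0,0) < (0,1) < (1,0) < (1,1), each with its steps in increasing order.
--     s00, s01, s10, s11 = set(), set(), set(), set()
--     for row in rows:
--         try:
--             step = int(str(row.get("Step", "") or "1"))
--         except ValueError:
--             step = 1
--         fp_val = 0 if str(row.get("FP", "")).strip() == "0" else 1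
--         charged_val = 1 if str(row.get("Charged", "")).strip() == "1" else 0
--         if fp_val == 0:
--             if charged_val == 0:
--                 s00.add(step)
--             else:
--                 s01.add(step)
--         else:
--             if charged_val == 0:
--                 s10.add(step)
--             else:
--                 s11.add(step)
--     out = []
--     for fp, ch, steps in ((0, 0, s00), (0, 1, s01), (1, 0, s10), (1, 1, s11)):
--         for step in sorted(steps):
--             out.append((fp, ch, step))
--     return tuple(out)
-- ===== Notes on version B (the rewrite author's own statement) =====
-- stated objective: alternative
-- what changed: Replaces A's hash-set of triples plus a full lexicographic sort by a bucket/radix scheme: steps are distributed into four sets keyed by the (fp, charged) pair, and the output is assembled bucket-by-bucket in the fixed order (0,0),(0,1),(1,0),(1,1) with only the integer steps of each bucket sorted.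
import Mathlib
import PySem

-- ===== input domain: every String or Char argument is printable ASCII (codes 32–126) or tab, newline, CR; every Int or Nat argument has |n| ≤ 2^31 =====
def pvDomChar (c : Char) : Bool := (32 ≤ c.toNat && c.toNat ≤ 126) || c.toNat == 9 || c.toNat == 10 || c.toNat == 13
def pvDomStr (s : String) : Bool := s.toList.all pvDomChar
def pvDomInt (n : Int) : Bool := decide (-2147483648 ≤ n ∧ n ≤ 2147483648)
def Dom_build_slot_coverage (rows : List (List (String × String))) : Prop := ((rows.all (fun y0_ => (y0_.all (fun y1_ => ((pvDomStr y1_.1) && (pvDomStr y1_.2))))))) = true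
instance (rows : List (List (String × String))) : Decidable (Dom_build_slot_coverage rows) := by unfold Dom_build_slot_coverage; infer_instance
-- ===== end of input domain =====

-- B replaces A's set-of-triples + full lexicographic sort by a bucket scheme: steps are
-- distributed into four sets keyed by (fp, charged) and the output is assembled bucket by
-- bucket in the fixed order (0,0),(0,1),(1,0),(1,1), sorting only the ints of each bucket.

-- Python tuple order on (int, int, int): '<' on Prod.Lex is Python's lexicographic tuple order,
-- so sorting with this order-isomorphic injective key is exact for Python's keyless sorted().
def pvLexKey (t : Int × Int × Int) : Int ×ₗ (Int ×ₗ Int) := toLex (t.1, toLex (t.2.1, t.2.2))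

-- ===== PORT A =====
def build_slot_coverage (rows : List (List (String × String))) : List (Int × Int × Int) :=
  let slots : PySem.Set (Int × Int × Int) :=
    rows.foldl (fun slots row =>
      -- try: step = int(str(row.get("Step","") or "1")) except ValueError: step = 1
      let rawStep := PySem.Dict.getD (PySem.Dict.mk row) "Step" ""
      let step : Int := match PySem.Int.ofStr? (if rawStep = "" then "1" else rawStep) with
        | some v => v
        | none => 1
      let fp_val : Int := if PySem.Str.strip (PySem.Dict.getD (PySem.Dict.mk row) "FP" "") = "0" then 0 else 1
      let charged_val : Int := if PySem.Str.strip (PySem.Dict.getD (PySem.Dict.mk row) "Charged" "") = "1" then 1 else 0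
      PySem.Set.add slots (fp_val, charged_val, step)) PySem.Set.empty
  PySem.List.sorted slots pvLexKey false

-- ===== PORT B =====
def build_slot_coverage_alt (rows : List (List (String × String))) : List (Int × Int × Int) :=
  let bs : PySem.Set Int × PySem.Set Int × PySem.Set Int × PySem.Set Int :=
    rows.foldl (fun bs row =>
      let rawStep := PySem.Dict.getD (PySem.Dict.mk row) "Step" ""
      let step : Int := match PySem.Int.ofStr? (if rawStep = "" then "1" else rawStep) with
        | some v => v
        | none => 1
      let fp_val : Int := if PySem.Str.strip (PySem.Dict.getD (PySem.Dict.mk row) "FP" "") = "0" then 0 else 1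
      let charged_val : Int := if PySem.Str.strip (PySem.Dict.getD (PySem.Dict.mk row) "Charged" "") = "1" then 1 else 0
      if fp_val = 0 then
        if charged_val = 0 then (PySem.Set.add bs.1 step, bs.2.1, bs.2.2.1, bs.2.2.2)
        else (bs.1, PySem.Set.add bs.2.1 step, bs.2.2.1, bs.2.2.2)
      else
        if charged_val = 0 then (bs.1, bs.2.1, PySem.Set.add bs.2.2.1 step, bs.2.2.2)
        else (bs.1, bs.2.1, bs.2.2.1, PySem.Set.add bs.2.2.2 step))
      (PySem.Set.empty, PySem.Set.empty, PySem.Set.empty, PySem.Set.empty)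
  (PySem.List.sorted bs.1 (fun x => x) false).map (fun s => ((0 : Int), (0 : Int), s))
  ++ (PySem.List.sorted bs.2.1 (fun x => x) false).map (fun s => ((0 : Int), (1 : Int), s))
  ++ (PySem.List.sorted bs.2.2.1 (fun x => x) false).map (fun s => ((1 : Int), (0 : Int), s))
  ++ (PySem.List.sorted bs.2.2.2 (fun x => x) false).map (fun s => ((1 : Int), (1 : Int), s))

-- ===== PRECONDITION & SPEC =====
def Spec_build_slot_coverage (rows : List (List (String × String))) (out : List (Int × Int × Int)) : Prop := out = build_slot_coverage_alt rows
instance (rows : List (List (String × String))) (out : List (Int × Int × Int)) : Decidable (Spec_build_slot_coverage rows out) := by unfold Spec_build_slot_coverage; infer_instance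

-- ===== CLAIM (what is proved, stated in full; the proofs are below) =====
def Claim_equal_build_slot_coverage : Prop := ∀ (rows : List (List (String × String))), Dom_build_slot_coverage rows → Spec_build_slot_coverage rows (build_slot_coverage rows)

-- ===== LEMMAS AND PROOFS =====

-- the per-row parsed triple (proof-side helper; both port loop bodies are this up to projection)
def pvSlotOf (row : List (String × String)) : Int × Int × Int :=
  let rawStep := PySem.Dict.getD (PySem.Dict.mk row) "Step" ""
  let step : Int := match PySem.Int.ofStr? (if rawStep = "" then "1" else rawStep) with
    | some v => v
    | none => 1
  let fp_val : Int := if PySem.Str.strip (PySem.Dict.getD (PySem.Dict.mk row) "FP" "") = "0" then 0 else 1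
  let charged_val : Int := if PySem.Str.strip (PySem.Dict.getD (PySem.Dict.mk row) "Charged" "") = "1" then 1 else 0
  (fp_val, charged_val, step)

-- B's loop body as a function of the parsed triple
def pvBucketAdd (bs : PySem.Set Int × PySem.Set Int × PySem.Set Int × PySem.Set Int)
    (t : Int × Int × Int) : PySem.Set Int × PySem.Set Int × PySem.Set Int × PySem.Set Int :=
  if t.1 = 0 then
    if t.2.1 = 0 then (PySem.Set.add bs.1 t.2.2, bs.2.1, bs.2.2.1, bs.2.2.2)
    else (bs.1, PySem.Set.add bs.2.1 t.2.2, bs.2.2.1, bs.2.2.2)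
  else
    if t.2.1 = 0 then (bs.1, bs.2.1, PySem.Set.add bs.2.2.1 t.2.2, bs.2.2.2)
    else (bs.1, bs.2.1, bs.2.2.1, PySem.Set.add bs.2.2.2 t.2.2)

-- the four final buckets, characterised over the parsed items
theorem pvBuckets_spec (items : List (Int × Int × Int))
    (bs : PySem.Set Int × PySem.Set Int × PySem.Set Int × PySem.Set Int) :
    items.foldl pvBucketAdd bs =
      (PySem.Set.update bs.1 ((items.filter (fun t => t.1 = 0 ∧ t.2.1 = 0)).map (·.2.2)),
       PySem.Set.update bs.2.1 ((items.filter (fun t => t.1 = 0 ∧ t.2.1 ≠ 0)).map (·.2.2)),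
       PySem.Set.update bs.2.2.1 ((items.filter (fun t => t.1 ≠ 0 ∧ t.2.1 = 0)).map (·.2.2)),
       PySem.Set.update bs.2.2.2 ((items.filter (fun t => t.1 ≠ 0 ∧ t.2.1 ≠ 0)).map (·.2.2))) := by
  induction items generalizing bs with
  | nil => rfl
  | cons t items ih =>
    rw [List.foldl_cons, ih]
    by_cases h1 : t.1 = 0 <;> by_cases h2 : t.2.1 = 0 <;>
      simp [pvBucketAdd, h1, h2, PySem.Set.update]

-- Python's '<' on triples, through the lex key
theorem pvKey_lt_iff (a b : Int × Int × Int) :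
    pvLexKey a < pvLexKey b ↔ a.1 < b.1 ∨ (a.1 = b.1 ∧ (a.2.1 < b.2.1 ∨ (a.2.1 = b.2.1 ∧ a.2.2 < b.2.2))) := by
  simp [pvLexKey, Prod.Lex.toLex_lt_toLex]

-- the main equation, over arbitrary items whose first two coordinates are 0/1
theorem pvBucket_sorted (items : List (Int × Int × Int))
    (hc : ∀ t ∈ items, (t.1 = 0 ∨ t.1 = 1) ∧ (t.2.1 = 0 ∨ t.2.1 = 1)) :
    PySem.List.sorted (PySem.Set.ofList items) pvLexKey false =
      (PySem.List.sorted (PySem.Set.ofList ((items.filter (fun t => t.1 = 0 ∧ t.2.1 = 0)).map (·.2.2))) (fun x => x) false).map (fun s => ((0 : Int), (0 : Int), s))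
      ++ (PySem.List.sorted (PySem.Set.ofList ((items.filter (fun t => t.1 = 0 ∧ t.2.1 ≠ 0)).map (·.2.2))) (fun x => x) false).map (fun s => ((0 : Int), (1 : Int), s))
      ++ (PySem.List.sorted (PySem.Set.ofList ((items.filter (fun t => t.1 ≠ 0 ∧ t.2.1 = 0)).map (·.2.2))) (fun x => x) false).map (fun s => ((1 : Int), (0 : Int), s))
      ++ (PySem.List.sorted (PySem.Set.ofList ((items.filter (fun t => t.1 ≠ 0 ∧ t.2.1 ≠ 0)).map (·.2.2))) (fun x => x) false).map (fun s => ((1 : Int), (1 : Int), s)) := by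
  have hmem : ∀ (a b : Int) (l : List Int) (x : Int × Int × Int),
      x ∈ ((PySem.List.sorted (PySem.Set.ofList l) (fun x => x) false).map
        (fun s => (a, b, s))) ↔ x.1 = a ∧ x.2.1 = b ∧ x.2.2 ∈ l := by
    intro a b l x
    simp only [List.mem_map, PySem.List.mem_sorted, PySem.Set.mem_ofList]
    constructor
    · rintro ⟨s, hs, rfl⟩; exact ⟨rfl, rfl, hs⟩
    · rintro ⟨h1, h2, h3⟩
      exact ⟨x.2.2, h3, by rw [← h1, ← h2]⟩
  have hpart : ∀ (a b : Int) (l : List Int),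
      ((PySem.List.sorted (PySem.Set.ofList l) (fun x => x) false).map
        (fun s => (a, b, s))).Pairwise (fun x y => pvLexKey x < pvLexKey y) := by
    intro a b l
    rw [List.pairwise_map]
    exact List.Pairwise.imp
      (fun {s t} (h : s < t) =>
        (pvKey_lt_iff (a, b, s) (a, b, t)).mpr (Or.inr ⟨rfl, Or.inr ⟨rfl, h⟩⟩))
      (PySem.List.sorted_ofList_pairwise_lt l)
  have hcross : ∀ (a b a' b' : Int), (a < a' ∨ (a = a' ∧ b < b')) →
      ∀ (l l' : List Int) (x y : Int × Int × Int),
      x ∈ ((PySem.List.sorted (PySem.Set.ofList l) (fun x => x) false).map (fun s => (a, b, s))) →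
      y ∈ ((PySem.List.sorted (PySem.Set.ofList l') (fun x => x) false).map (fun s => (a', b', s))) →
      pvLexKey x < pvLexKey y := by
    intro a b a' b' hlt l l' x y hx hy
    obtain ⟨hx1, hx2, -⟩ := (hmem a b l x).mp hx
    obtain ⟨hy1, hy2, -⟩ := (hmem a' b' l' y).mp hy
    rcases hlt with h | ⟨h, h'⟩
    · exact (pvKey_lt_iff x y).mpr (Or.inl (by rw [hx1, hy1]; exact h))
    · exact (pvKey_lt_iff x y).mpr (Or.inr ⟨by rw [hx1, hy1, h], Or.inl (by rw [hx2, hy2]; exact h')⟩)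
  have tripleq : ∀ (t x : Int × Int × Int), t.1 = x.1 → t.2.1 = x.2.1 → t.2.2 = x.2.2 → t = x := by
    intro t x h1 h2 h3; exact Prod.ext h1 (Prod.ext h2 h3)
  have hpw : ((PySem.List.sorted (PySem.Set.ofList ((items.filter (fun t => t.1 = 0 ∧ t.2.1 = 0)).map (·.2.2))) (fun x => x) false).map (fun s => ((0 : Int), (0 : Int), s))
      ++ (PySem.List.sorted (PySem.Set.ofList ((items.filter (fun t => t.1 = 0 ∧ t.2.1 ≠ 0)).map (·.2.2))) (fun x => x) false).map (fun s => ((0 : Int), (1 : Int), s))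
      ++ (PySem.List.sorted (PySem.Set.ofList ((items.filter (fun t => t.1 ≠ 0 ∧ t.2.1 = 0)).map (·.2.2))) (fun x => x) false).map (fun s => ((1 : Int), (0 : Int), s))
      ++ (PySem.List.sorted (PySem.Set.ofList ((items.filter (fun t => t.1 ≠ 0 ∧ t.2.1 ≠ 0)).map (·.2.2))) (fun x => x) false).map (fun s => ((1 : Int), (1 : Int), s))).Pairwise
        (fun x y => pvLexKey x < pvLexKey y) := by
    refine List.pairwise_append.mpr ⟨List.pairwise_append.mpr ⟨List.pairwise_append.mpr
      ⟨hpart 0 0 _, hpart 0 1 _,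
        fun x hx y hy => hcross 0 0 0 1 (Or.inr ⟨rfl, by norm_num⟩) _ _ x y hx hy⟩,
      hpart 1 0 _, fun x hx y hy => ?_⟩, hpart 1 1 _, fun x hx y hy => ?_⟩
    · rcases List.mem_append.mp hx with hx | hx
      · exact hcross 0 0 1 0 (Or.inl (by norm_num)) _ _ x y hx hy
      · exact hcross 0 1 1 0 (Or.inl (by norm_num)) _ _ x y hx hy
    · rcases List.mem_append.mp hx with hx | hx
      · rcases List.mem_append.mp hx with hx | hx
        · exact hcross 0 0 1 1 (Or.inl (by norm_num)) _ _ x y hx hy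
        · exact hcross 0 1 1 1 (Or.inl (by norm_num)) _ _ x y hx hy
      · exact hcross 1 0 1 1 (Or.inr ⟨rfl, by norm_num⟩) _ _ x y hx hy
  apply PySem.List.sorted_eq_of_perm_of_pairwise_lt
  case hs =>
   exact hpw
  have hnd : ((PySem.List.sorted (PySem.Set.ofList ((items.filter (fun t => t.1 = 0 ∧ t.2.1 = 0)).map (·.2.2))) (fun x => x) false).map (fun s => ((0 : Int), (0 : Int), s))
      ++ (PySem.List.sorted (PySem.Set.ofList ((items.filter (fun t => t.1 = 0 ∧ t.2.1 ≠ 0)).map (·.2.2))) (fun x => x) false).map (fun s => ((0 : Int), (1 : Int), s))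
      ++ (PySem.List.sorted (PySem.Set.ofList ((items.filter (fun t => t.1 ≠ 0 ∧ t.2.1 = 0)).map (·.2.2))) (fun x => x) false).map (fun s => ((1 : Int), (0 : Int), s))
      ++ (PySem.List.sorted (PySem.Set.ofList ((items.filter (fun t => t.1 ≠ 0 ∧ t.2.1 ≠ 0)).map (·.2.2))) (fun x => x) false).map (fun s => ((1 : Int), (1 : Int), s))).Nodup :=
    hpw.imp (fun h e => absurd (congrArg pvLexKey e) (ne_of_lt h))
  rw [List.perm_ext_iff_of_nodup hnd (PySem.Set.nodup_ofList items)]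
  intro x
  simp only [List.mem_append, hmem, PySem.Set.mem_ofList, List.mem_map, List.mem_filter,
    decide_eq_true_eq]
  constructor
  · rintro (((⟨h1, h2, t, ⟨ht, hp1, hp2⟩, hte⟩ | ⟨h1, h2, t, ⟨ht, hp1, hp2⟩, hte⟩) |
      ⟨h1, h2, t, ⟨ht, hp1, hp2⟩, hte⟩) | ⟨h1, h2, t, ⟨ht, hp1, hp2⟩, hte⟩)
    · exact tripleq t x (by omega) (by omega) hte ▸ ht
    · obtain ⟨-, hcb⟩ := hc t ht
      exact tripleq t x (by omega) (by omega) hte ▸ ht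
    · obtain ⟨hca, -⟩ := hc t ht
      exact tripleq t x (by omega) (by omega) hte ▸ ht
    · obtain ⟨hca, hcb⟩ := hc t ht
      exact tripleq t x (by omega) (by omega) hte ▸ ht
  · intro hx
    obtain ⟨ha, hb⟩ := hc x hx
    rcases ha with ha | ha <;> rcases hb with hb | hb
    · exact Or.inl (Or.inl (Or.inl ⟨ha, hb, x, ⟨hx, ha, hb⟩, rfl⟩))
    · exact Or.inl (Or.inl (Or.inr ⟨ha, hb, x, ⟨hx, ha, by omega⟩, rfl⟩))
    · exact Or.inl (Or.inr ⟨by omega, hb, x, ⟨hx, by omega, hb⟩, rfl⟩)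
    · exact Or.inr ⟨by omega, by omega, x, ⟨hx, by omega, by omega⟩, rfl⟩

-- ===== VERDICT (by name: the statement is the Claim_ definition above) =====
theorem build_slot_coverage_spec : Claim_equal_build_slot_coverage := by
  intro rows _
  show build_slot_coverage rows = build_slot_coverage_alt rows
  have hA : build_slot_coverage rows
      = PySem.List.sorted (rows.foldl (fun s r => PySem.Set.add s (pvSlotOf r)) PySem.Set.empty) pvLexKey false := rfl
  have hB : build_slot_coverage_alt rows
      = (let bs := (rows.map pvSlotOf).foldl pvBucketAdd (PySem.Set.empty, PySem.Set.empty, PySem.Set.empty, PySem.Set.empty)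
         (PySem.List.sorted bs.1 (fun x => x) false).map (fun s => ((0 : Int), (0 : Int), s))
         ++ (PySem.List.sorted bs.2.1 (fun x => x) false).map (fun s => ((0 : Int), (1 : Int), s))
         ++ (PySem.List.sorted bs.2.2.1 (fun x => x) false).map (fun s => ((1 : Int), (0 : Int), s))
         ++ (PySem.List.sorted bs.2.2.2 (fun x => x) false).map (fun s => ((1 : Int), (1 : Int), s))) := by
    simp only [build_slot_coverage_alt, List.foldl_map]
    rfl
  rw [hA, ← PySem.Set.update_map_eq_foldl_add (f := pvSlotOf) (s := PySem.Set.empty) (l := rows),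
    PySem.Set.update_empty, hB, pvBuckets_spec]
  simp only [PySem.Set.update_empty]
  apply pvBucket_sorted
  intro t ht
  rcases List.mem_map.mp ht with ⟨row, _, rfl⟩
  constructor
  · simp only [pvSlotOf]; split_ifs <;> simp
  · simp only [pvSlotOf]; split_ifs <;> simp
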